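-- pv_equiv track=rewrite | github.com/Anurag-Saksena/StockAnalysis | finance_tools.py | at_least_2_common
-- ===== SOURCE A (Python) =====
-- def at_least_2_common(dict1: dict, dict2: dict) -> bool:
--     """
--     This function returns 'True' if the dictionaries 'dict1' and 'dict2' have 2 or more
--     equal key pairs. Otherwise, it returns 'False'
--     """
--     count = 0
--     for key1 in dict1.keys():
--         for key2 in dict2.keys():
--             if key1 == key2:
--                 count += 1
--                 if count == 2:
--                     return True
--                 break
--     return False
-- ===== SOURCE B (Python) =====
-- def at_least_2_common(dict1: dict, dict2: dict) -> bool: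
--     """
--     Returns True iff dict1 and dict2 share at least 2 common keys.
--     """
--     return len(dict1.keys() & dict2.keys()) >= 2
-- ===== Notes on version B (the rewrite author's own statement) =====
-- stated objective: simpler
-- what changed: Replaces the nested key-comparison loops with an early-exit counter by a single set intersection of the two key views followed by a length test; no loops or branches remain.
import Mathlib
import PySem

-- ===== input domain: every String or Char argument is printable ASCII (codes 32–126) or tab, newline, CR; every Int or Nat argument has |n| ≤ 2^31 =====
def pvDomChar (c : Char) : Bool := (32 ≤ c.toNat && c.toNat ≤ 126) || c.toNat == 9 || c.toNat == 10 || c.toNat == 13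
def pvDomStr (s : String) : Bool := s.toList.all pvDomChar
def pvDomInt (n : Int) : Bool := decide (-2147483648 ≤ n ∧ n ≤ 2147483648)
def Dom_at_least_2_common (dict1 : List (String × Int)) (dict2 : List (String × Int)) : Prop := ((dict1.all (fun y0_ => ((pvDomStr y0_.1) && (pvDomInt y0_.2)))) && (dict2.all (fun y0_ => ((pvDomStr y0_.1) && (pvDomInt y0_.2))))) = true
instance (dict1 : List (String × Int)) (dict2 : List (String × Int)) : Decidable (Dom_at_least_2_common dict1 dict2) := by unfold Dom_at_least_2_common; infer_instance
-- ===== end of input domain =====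

-- B replaces A's nested loops with an early-exit counter by one key-set intersection and a length test (simpler).

-- ===== PORT A =====
-- inner 'for key2 in dict2.keys(): if key1 == key2: … break' — returns whether a match was found
def pvInnerA (key1 : String) : List String → Bool
  | [] => false
  | key2 :: rest => if key1 == key2 then true else pvInnerA key1 rest

-- outer loop over dict1's keys with the counter and the early return at count == 2
def pvLoopA (k2 : List String) : List String → Int → Bool
  | [], _ => false
  | key1 :: rest, count =>
    if pvInnerA key1 k2 then
      (if count + 1 == 2 then true else pvLoopA k2 rest (count + 1))
    else pvLoopA k2 rest count

def at_least_2_common (dict1 : List (String × Int)) (dict2 : List (String × Int)) : Bool :=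
  pvLoopA (PySem.Dict.keys (PySem.Dict.ofList dict2)) (PySem.Dict.keys (PySem.Dict.ofList dict1)) 0

-- ===== PORT B =====
-- len(dict1.keys() & dict2.keys()) >= 2 : the common keys in one intersection, then the length test
def at_least_2_common_alt (dict1 : List (String × Int)) (dict2 : List (String × Int)) : Bool :=
  decide (2 ≤ ((PySem.Dict.keys (PySem.Dict.ofList dict1)).filter
      (fun k => (PySem.Dict.ofList dict2).contains k)).length)

-- ===== PRECONDITION & SPEC =====
def Spec_at_least_2_common (dict1 : List (String × Int)) (dict2 : List (String × Int)) (out : Bool) : Prop := out = at_least_2_common_alt dict1 dict2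
instance (dict1 : List (String × Int)) (dict2 : List (String × Int)) (out : Bool) : Decidable (Spec_at_least_2_common dict1 dict2 out) := by unfold Spec_at_least_2_common; infer_instance

-- ===== CLAIM (what is proved, stated in full; the proofs are below) =====
def Claim_equal_at_least_2_common : Prop := ∀ (dict1 : List (String × Int)) (dict2 : List (String × Int)), Dom_at_least_2_common dict1 dict2 → Spec_at_least_2_common dict1 dict2 (at_least_2_common dict1 dict2)

-- ===== LEMMAS AND PROOFS =====

-- A's inner loop is membership in dict2's key list
theorem pvInnerA_eq_contains (key1 : String) (k2 : List String) :
    pvInnerA key1 k2 = k2.contains key1 := by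
  induction k2 with
  | nil => rfl
  | cons h t ih =>
    simp only [pvInnerA, List.contains_cons, ih]
    by_cases hk : key1 = h
    · simp [hk]
    · simp [hk]

-- A's outer loop, started at count 0 or 1, decides whether the number of keys of k1
-- found in k2 reaches 2 resp. 1
theorem pvLoopA_eq (k2 k1 : List String) :
    pvLoopA k2 k1 0 = decide (2 ≤ (k1.filter (fun k => k2.contains k)).length) ∧
    pvLoopA k2 k1 1 = decide (1 ≤ (k1.filter (fun k => k2.contains k)).length) := by
  induction k1 with
  | nil => simp [pvLoopA]
  | cons h t ih =>
    simp only [pvLoopA, pvInnerA_eq_contains, List.filter_cons]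
    by_cases hc : k2.contains h = true
    · simp only [hc, if_true, List.length_cons]
      constructor
      · norm_num [ih.2]; omega
      · simp
    · simp only [hc, if_false, Bool.false_eq_true]
      exact ih

-- ===== VERDICT (by name: the statement is the Claim_ definition above) =====
theorem at_least_2_common_spec : Claim_equal_at_least_2_common := by
  intro d1 d2 _
  unfold Spec_at_least_2_common at_least_2_common at_least_2_common_alt
  rw [(pvLoopA_eq _ _).1]
  congr 1
  simp [PySem.Dict.contains_eq_decide_mem_keys]
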